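-- pv_equiv track=rewrite | github.com/Eximmate-std/Python-prac | 20241021/1/prog.py | count_unique_letter_pairs
-- ===== SOURCE A (Python) =====
-- def count_unique_letter_pairs(text):
--     text = text.lower()
--
--     unique_pairs = set()
--
--     for i in range(len(text) - 1):
--         if text[i].isalpha() and text[i + 1].isalpha():
--             pair = text[i] + text[i + 1]
--             unique_pairs.add(pair)
--
--     return len(unique_pairs)
-- ===== SOURCE B (Python) =====
-- def count_unique_letter_pairs(text):
--     # Generate-and-test: enumerate all 26*26 candidate lowercase bigrams and
--     # count those that occur as a substring of the lowered text (any adjacent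
--     # alphabetic pair in ASCII text lowers to such a bigram).
--     text = text.lower()
--     letters = "abcdefghijklmnopqrstuvwxyz"
--     return sum(1 for a in letters for b in letters if a + b in text)
-- ===== Notes on version B (the rewrite author's own statement) =====
-- stated objective: alternative
-- what changed: Instead of scanning the text index by index and collecting adjacent alphabetic pairs into a set, B enumerates all 26x26 candidate lowercase bigrams and counts those that occur as substrings of the lowered text (generate-and-test, no pair scan and no set).
import Mathlib
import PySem

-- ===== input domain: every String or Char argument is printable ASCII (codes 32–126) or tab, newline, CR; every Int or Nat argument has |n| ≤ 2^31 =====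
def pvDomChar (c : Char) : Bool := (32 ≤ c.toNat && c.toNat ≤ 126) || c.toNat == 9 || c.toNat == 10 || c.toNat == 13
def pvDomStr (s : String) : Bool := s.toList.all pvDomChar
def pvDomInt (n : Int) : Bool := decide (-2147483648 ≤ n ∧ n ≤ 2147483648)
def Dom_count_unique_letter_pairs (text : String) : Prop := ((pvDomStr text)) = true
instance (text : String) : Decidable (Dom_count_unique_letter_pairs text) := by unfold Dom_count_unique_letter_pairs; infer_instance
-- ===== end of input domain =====

-- B replaces A's index scan that collects adjacent alphabetic pairs into a set by
-- generate-and-test over all 26*26 candidate lowercase bigrams, counting those that are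
-- substrings of the lowered text (objective: alternative; equal on the ASCII domain Dom_).

-- ===== PORT A =====
-- A: lower the text, then for i in range(len(text)-1) add text[i]+text[i+1] to a set
-- when both chars are alphabetic; return the set's size.
def count_unique_letter_pairs (text : String) : Int :=
  let t := (PySem.Str.lower text).toList
  let pairs :=
    (PySem.List.pyRange 0 ((t.length : Int) - 1) 1).foldl
      (fun (s : PySem.Set String) i =>
        if PySem.Chars.isalpha (PySem.List.pyGetD t i ' ') &&
           PySem.Chars.isalpha (PySem.List.pyGetD t (i + 1) ' ') then
          s.add (String.ofList [PySem.List.pyGetD t i ' ', PySem.List.pyGetD t (i + 1) ' '])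
        else s)
      PySem.Set.empty
  (PySem.Set.len pairs : Int)

-- ===== PORT B =====
-- B: lower the text, then sum 1 over a in letters, b in letters with (a+b) in text.
def count_unique_letter_pairs_alt (text : String) : Int :=
  let t := PySem.Str.lower text
  let letters := "abcdefghijklmnopqrstuvwxyz".toList
  letters.foldl
    (fun (acc : Int) a =>
      letters.foldl
        (fun (acc : Int) b =>
          if PySem.Str.isIn (String.ofList [a, b]) t then acc + 1 else acc)
        acc)
    0

-- ===== PRECONDITION & SPEC =====
def Spec_count_unique_letter_pairs (text : String) (out : Int) : Prop := out = count_unique_letter_pairs_alt text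
instance (text : String) (out : Int) : Decidable (Spec_count_unique_letter_pairs text out) := by unfold Spec_count_unique_letter_pairs; infer_instance

-- ===== CLAIM (what is proved, stated in full; the proofs are below) =====
def Claim_equal_count_unique_letter_pairs : Prop := ∀ (text : String), Dom_count_unique_letter_pairs text → Spec_count_unique_letter_pairs text (count_unique_letter_pairs text)

-- ===== LEMMAS AND PROOFS =====

-- the adjacent both-alphabetic pairs of a char list, in order
def pairsAdj : List Char → List String
  | a :: b :: rest =>
      (if PySem.Chars.isalpha a && PySem.Chars.isalpha b then [String.ofList [a, b]] else [])
        ++ pairsAdj (b :: rest)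
  | _ => []

def lettersL : List Char := "abcdefghijklmnopqrstuvwxyz".toList

def bigrams : List (Char × Char) := lettersL.flatMap (fun a => lettersL.map (fun b => (a, b)))

-- A's fold over indices, rewritten as a fold over adjacent zipped pairs
theorem foldl_range_eq_zip (l : List Char) (s : PySem.Set String) :
    (List.range (l.length - 1)).foldl
      (fun (s : PySem.Set String) k =>
        if PySem.Chars.isalpha (l.getD k ' ') && PySem.Chars.isalpha (l.getD (k + 1) ' ') then
          s.add (String.ofList [l.getD k ' ', l.getD (k + 1) ' '])
        else s) s
    = (l.zip l.tail).foldl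
      (fun (s : PySem.Set String) p =>
        if PySem.Chars.isalpha p.1 && PySem.Chars.isalpha p.2 then
          s.add (String.ofList [p.1, p.2])
        else s) s := by
  induction l generalizing s with
  | nil => simp
  | cons a rest ih =>
    cases rest with
    | nil => simp
    | cons b r =>
      have hlen : (a :: b :: r).length - 1 = (b :: r).length - 1 + 1 := by
        simp
      rw [hlen, List.range_succ_eq_map, List.foldl_cons, List.foldl_map]
      simp only [List.getD_cons_succ, List.getD_cons_zero, List.zip_cons_cons,
        List.tail_cons, List.foldl_cons]
      exact ih _

-- zip fold collapses to folding Set.add over pairsAdj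
theorem foldl_zip_eq_pairsAdj (l : List Char) (s : PySem.Set String) :
    (l.zip l.tail).foldl
      (fun (s : PySem.Set String) p =>
        if PySem.Chars.isalpha p.1 && PySem.Chars.isalpha p.2 then
          s.add (String.ofList [p.1, p.2])
        else s) s
    = (pairsAdj l).foldl PySem.Set.add s := by
  induction l generalizing s with
  | nil => simp [pairsAdj]
  | cons a rest ih =>
    cases rest with
    | nil => simp [pairsAdj]
    | cons b r =>
      simp only [List.zip_cons_cons, List.tail_cons, List.foldl_cons, pairsAdj,
        List.foldl_append]
      by_cases h : (PySem.Chars.isalpha a && PySem.Chars.isalpha b) = true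
      · simp only [h, if_true, List.foldl_cons, List.foldl_nil]
        exact ih _
      · simp only [h, if_false, Bool.false_eq_true, List.foldl_nil]
        exact ih _

-- A's fold builds exactly the set of the strings in pairsAdj
theorem setsEq2 (l : List Char) :
    (PySem.List.pyRange 0 ((l.length : Int) - 1) 1).foldl
      (fun (s : PySem.Set String) i =>
        if PySem.Chars.isalpha (PySem.List.pyGetD l i ' ') &&
           PySem.Chars.isalpha (PySem.List.pyGetD l (i + 1) ' ') then
          s.add (String.ofList [PySem.List.pyGetD l i ' ', PySem.List.pyGetD l (i + 1) ' '])
        else s)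
      PySem.Set.empty
    = PySem.Set.ofList (pairsAdj l) := by
  rw [PySem.List.pyRange_one]
  have hcast : (((l.length : Int)) - 1 - 0).toNat = l.length - 1 := by omega
  rw [hcast, List.foldl_map]
  have hbody :
      (List.range (l.length - 1)).foldl
        (fun (s : PySem.Set String) (k : Nat) =>
          if PySem.Chars.isalpha (PySem.List.pyGetD l ((0:Int) + k) ' ') &&
             PySem.Chars.isalpha (PySem.List.pyGetD l ((0:Int) + k + 1) ' ') then
            s.add (String.ofList [PySem.List.pyGetD l ((0:Int) + k) ' ',
                              PySem.List.pyGetD l ((0:Int) + k + 1) ' '])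
          else s) PySem.Set.empty
      = (List.range (l.length - 1)).foldl
        (fun (s : PySem.Set String) k =>
          if PySem.Chars.isalpha (l.getD k ' ') && PySem.Chars.isalpha (l.getD (k + 1) ' ') then
            s.add (String.ofList [l.getD k ' ', l.getD (k + 1) ' '])
          else s) PySem.Set.empty := by
    apply List.foldl_ext
    intro s k _
    simp only [zero_add]
    have e2 : (k:Int) + 1 = (((k + 1 : Nat)):Int) := by push_cast; ring
    rw [e2, PySem.List.pyGetD_natCast, PySem.List.pyGetD_natCast]
  rw [hbody, foldl_range_eq_zip, foldl_zip_eq_pairsAdj]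
  rfl

-- A computes the size of the set of the strings in pairsAdj of the lowered text
theorem A_eq_setOf_pairsAdj (text : String) :
    count_unique_letter_pairs text
      = ((PySem.Set.ofList (pairsAdj ((PySem.Str.lower text).toList))).length : Int) := by
  simp only [count_unique_letter_pairs, PySem.Set.len]
  rw [setsEq2]

-- membership in pairsAdj: exactly the length-2 infixes with both chars alphabetic
theorem mem_pairsAdj (l : List Char) (s : String) :
    s ∈ pairsAdj l ↔ ∃ a b : Char, PySem.Chars.isalpha a = true ∧ PySem.Chars.isalpha b = true ∧
      [a, b] <:+: l ∧ s = String.ofList [a, b] := by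
  induction l with
  | nil =>
    simp [pairsAdj]
  | cons x rest ih =>
    cases rest with
    | nil =>
      simp [pairsAdj]
      intro a b _ _ h
      have := h.length_le
      simp at this
    | cons y r =>
      constructor
      · intro hs
        simp only [pairsAdj, List.mem_append] at hs
        rcases hs with hs | hs
        · by_cases hab : (PySem.Chars.isalpha x && PySem.Chars.isalpha y) = true
          · rw [if_pos hab] at hs
            simp at hs
            subst hs
            have hab' : PySem.Chars.isalpha x = true ∧ PySem.Chars.isalpha y = true := by
              simpa using hab
            refine ⟨x, y, hab'.1, hab'.2, ?_, rfl⟩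
            exact (List.prefix_iff_eq_take.mpr (by simp)).isInfix
          · rw [if_neg hab] at hs; simp at hs
        · obtain ⟨a, b, ha, hb, hinf, hse⟩ := (ih).mp hs
          exact ⟨a, b, ha, hb, hinf.trans (List.suffix_cons x (y :: r)).isInfix, hse⟩
      · rintro ⟨a, b, ha, hb, hinf, rfl⟩
        rcases List.infix_cons_iff.mp hinf with hpre | hinf'
        · rcases List.cons_prefix_cons.mp hpre with ⟨rfl, hpre2⟩
          rcases List.cons_prefix_cons.mp hpre2 with ⟨rfl, _⟩
          simp only [pairsAdj, List.mem_append]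
          left
          rw [if_pos (by simp [ha, hb])]
          simp
        · simp only [pairsAdj, List.mem_append]
          right
          exact ih.mpr ⟨a, b, ha, hb, hinf', rfl⟩

-- an ASCII-lowercase char is one of the 26 letters
theorem islower_mem_lettersL (d : Char) (h : PySem.Chars.islower d = true) : d ∈ lettersL := by
  simp [PySem.Chars.islower, Char.le_def] at h
  have h1 : 97 ≤ d.toNat := h.1
  have h2 : d.toNat ≤ 122 := h.2
  have hl : lettersL = (List.range 26).map (fun k => Char.ofNat (97 + k)) := by decide
  rw [hl, List.mem_map]
  refine ⟨d.toNat - 97, by rw [List.mem_range]; omega, ?_⟩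
  have e : 97 + (d.toNat - 97) = d.toNat := by omega
  rw [e, Char.ofNat_toNat]

-- an alphabetic char of a lowered list is one of the 26 letters
theorem alpha_lowerChar_mem (c : Char)
    (h : PySem.Chars.isalpha (PySem.Chars.lowerChar c) = true) :
    PySem.Chars.lowerChar c ∈ lettersL := by
  apply islower_mem_lettersL
  simp [PySem.Chars.isalpha] at h
  rcases h with h | h
  · exfalso
    simp [PySem.Chars.lowerChar] at h
    by_cases hu : PySem.Chars.isupper c = true
    · simp [hu] at h
      simp [PySem.Chars.isupper, Char.le_def, UInt32.le_iff_toNat_le] at hu h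
      have hv : ((c.toNat + 32 : Nat)).isValidChar := Or.inl (by omega)
      rw [Char.toNat_ofNat, if_pos hv] at h
      omega
    · simp [hu] at h
  · exact h

theorem mem_lettersL_alpha (a : Char) (h : a ∈ lettersL) : PySem.Chars.isalpha a = true := by
  have hall : lettersL.all PySem.Chars.isalpha = true := by decide
  exact List.all_eq_true.mp hall a h

theorem bigrams_eq_product : bigrams = lettersL ×ˢ lettersL := rfl

theorem nodup_lettersL : lettersL.Nodup := by decide

theorem nodup_bigrams : bigrams.Nodup := by
  rw [bigrams_eq_product]
  exact nodup_lettersL.product nodup_lettersL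

theorem mem_bigrams (a b : Char) : (a, b) ∈ bigrams ↔ a ∈ lettersL ∧ b ∈ lettersL := by
  rw [bigrams_eq_product]
  exact List.pair_mem_product

-- B counts the bigrams that occur in the lowered text
theorem B_eq_count (text : String) :
    count_unique_letter_pairs_alt text
      = ((bigrams.filter
            (fun q => PySem.Chars.isIn [q.1, q.2] ((PySem.Str.lower text).toList))).length : Int) := by
  rw [count_unique_letter_pairs_alt]
  have hL : "abcdefghijklmnopqrstuvwxyz".toList = lettersL := rfl
  rw [hL]
  have h1 : ∀ (init : Int),
      lettersL.foldl
        (fun (acc : Int) a =>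
          lettersL.foldl
            (fun (acc : Int) b =>
              if PySem.Str.isIn (String.ofList [a, b]) (PySem.Str.lower text) then acc + 1 else acc)
            acc) init
      = bigrams.foldl
          (fun (acc : Int) q =>
            if PySem.Str.isIn (String.ofList [q.1, q.2]) (PySem.Str.lower text) then acc + 1 else acc)
          init := by
    intro init
    rw [bigrams, List.foldl_flatMap]
    apply List.foldl_ext
    intro acc a _
    rw [List.foldl_map]
  rw [h1, PySem.List.foldl_count_if
        (fun q => PySem.Str.isIn (String.ofList [q.1, q.2]) (PySem.Str.lower text)) bigrams 0]
  rw [List.countP_eq_length_filter]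
  norm_num

theorem main_perm (text : String) :
    (PySem.Set.ofList (pairsAdj ((PySem.Str.lower text).toList))).Perm
      ((bigrams.filter
          (fun q => PySem.Chars.isIn [q.1, q.2] ((PySem.Str.lower text).toList))).map
        (fun q => String.ofList [q.1, q.2])) := by
  have ht : (PySem.Str.lower text).toList = List.map PySem.Chars.lowerChar text.toList := by
    simp [PySem.Chars.lower]
  have hinj : Function.Injective (fun q : Char × Char => String.ofList [q.1, q.2]) := by
    rintro ⟨a, b⟩ ⟨c, d⟩ h
    have h2 := congrArg String.toList h
    simp at h2
    simp [h2.1, h2.2]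
  apply (List.perm_ext_iff_of_nodup (PySem.Set.nodup_ofList _)
    ((nodup_bigrams.filter _).map hinj)).mpr
  intro s
  rw [PySem.Set.mem_ofList, mem_pairsAdj, List.mem_map]
  constructor
  · rintro ⟨a, b, ha, hb, hinf, rfl⟩
    refine ⟨(a, b), ?_, rfl⟩
    rw [List.mem_filter, mem_bigrams]
    have hat : a ∈ (PySem.Str.lower text).toList := hinf.subset (by simp)
    have hbt : b ∈ (PySem.Str.lower text).toList := hinf.subset (by simp)
    rw [ht] at hat hbt
    obtain ⟨c, _, rfl⟩ := List.mem_map.mp hat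
    obtain ⟨d, _, rfl⟩ := List.mem_map.mp hbt
    refine ⟨⟨alpha_lowerChar_mem c ha, alpha_lowerChar_mem d hb⟩, ?_⟩
    simpa using (PySem.Chars.isIn_iff_infix _ _).mpr hinf
  · rintro ⟨⟨a, b⟩, hmem, rfl⟩
    rw [List.mem_filter, mem_bigrams] at hmem
    refine ⟨a, b, mem_lettersL_alpha a hmem.1.1, mem_lettersL_alpha b hmem.1.2, ?_, rfl⟩
    exact (PySem.Chars.isIn_iff_infix _ _).mp (by simpa using hmem.2)

-- ===== VERDICT (by name: the statement is the Claim_ definition above) =====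
theorem count_unique_letter_pairs_spec : Claim_equal_count_unique_letter_pairs := by
  intro text _
  show _ = _
  rw [A_eq_setOf_pairsAdj, B_eq_count]
  rw [(main_perm text).length_eq, List.length_map]
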